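-- pv_equiv track=rewrite | github.com/aglahir1/Advent-of-Code | Advent of Code/2017/11.py | partOne
-- ===== SOURCE A (Python) =====
-- def sign(x: int):
--     if x < 0:
--         return '-'
--     return '+'
--
-- def manhattanOnHex(posx, posy):
--     if sign(posx) == sign(posy):
--         return abs(posx) + abs(posy)
--     return max(abs(posx), abs(posy))
--
-- def partOne(i):
--     position = [0, 0]
--     for step in i:
--         match step:
--             case 'n':
--                 position[1] += 1
--             case 's':
--                 position[1] -= 1
--             case 'ne':
--                 position[0] += 1
--             case 'sw':
--                 position[0] -= 1
--             case 'nw':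
--                 position[0] -= 1
--                 position[1] += 1
--             case 'se':
--                 position[0] += 1
--                 position[1] -= 1
--     return manhattanOnHex(*position)
-- ===== SOURCE B (Python) =====
-- def partOne(i):
--     n, s = i.count('n'), i.count('s')
--     ne, sw = i.count('ne'), i.count('sw')
--     nw, se = i.count('nw'), i.count('se')
--     x = ne - sw - nw + se
--     y = n - s + nw - se
--     return max(abs(x), abs(y), abs(x + y))
-- ===== Notes on version B (the rewrite author's own statement) =====
-- stated objective: alternative
-- what changed: B replaces A's stateful step-by-step walk with direction counting (six list.count tallies), derives the net axial displacement arithmetically from the counts, and returns the hex distance as max(|x|,|y|,|x+y|) instead of A's sign-comparison case split.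
import Mathlib
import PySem

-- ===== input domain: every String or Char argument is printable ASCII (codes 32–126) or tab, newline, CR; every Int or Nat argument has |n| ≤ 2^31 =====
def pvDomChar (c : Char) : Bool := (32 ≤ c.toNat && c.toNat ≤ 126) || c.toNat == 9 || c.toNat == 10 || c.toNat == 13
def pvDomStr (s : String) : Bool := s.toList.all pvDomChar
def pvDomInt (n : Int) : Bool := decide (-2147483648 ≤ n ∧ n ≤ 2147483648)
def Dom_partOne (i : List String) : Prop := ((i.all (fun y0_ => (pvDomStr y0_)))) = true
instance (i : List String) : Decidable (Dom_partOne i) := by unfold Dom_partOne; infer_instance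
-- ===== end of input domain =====

-- B replaces A's stateful walk by counting each direction once and computing the
-- hex distance as max(|x|,|y|,|x+y|) from the net displacement (objective: alternative).


-- ===== PORT A =====
def signA (x : Int) : String := if x < 0 then "-" else "+"

def manhattanOnHex (posx posy : Int) : Int :=
  if signA posx = signA posy then |posx| + |posy|
  else max |posx| |posy|

def stepA (p : Int × Int) (step : String) : Int × Int :=
  if step = "n" then (p.1, p.2 + 1)
  else if step = "s" then (p.1, p.2 - 1)
  else if step = "ne" then (p.1 + 1, p.2)
  else if step = "sw" then (p.1 - 1, p.2)
  else if step = "nw" then (p.1 - 1, p.2 + 1)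
  else if step = "se" then (p.1 + 1, p.2 - 1)
  else p

def partOne (i : List String) : Int :=
  let position := i.foldl stepA (0, 0)
  manhattanOnHex position.1 position.2

-- ===== PORT B =====
def partOne_alt (i : List String) : Int :=
  let n := (PySem.List.count i "n" : Int)
  let s := (PySem.List.count i "s" : Int)
  let ne := (PySem.List.count i "ne" : Int)
  let sw := (PySem.List.count i "sw" : Int)
  let nw := (PySem.List.count i "nw" : Int)
  let se := (PySem.List.count i "se" : Int)
  let x := ne - sw - nw + se
  let y := n - s + nw - se
  max (max |x| |y|) |x + y|

-- ===== PRECONDITION & SPEC =====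
def Spec_partOne (i : List String) (out : Int) : Prop := out = partOne_alt i
instance (i : List String) (out : Int) : Decidable (Spec_partOne i out) := by unfold Spec_partOne; infer_instance

-- ===== CLAIM (what is proved, stated in full; the proofs are below) =====
def Claim_equal_partOne : Prop := ∀ (i : List String), Dom_partOne i → Spec_partOne i (partOne i)

-- ===== LEMMAS AND PROOFS =====
theorem fold_counts (l : List String) (a b : Int) :
    l.foldl stepA (a, b) =
      (a + l.count "ne" - l.count "sw" - l.count "nw" + l.count "se",
       b + l.count "n" - l.count "s" + l.count "nw" - l.count "se") := by
  induction l generalizing a b with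
  | nil => simp
  | cons h t ih =>
    rw [List.foldl_cons]
    rcases hs : stepA (a, b) h with ⟨a', b'⟩
    rw [ih]
    unfold stepA at hs
    split_ifs at hs with h1 h2 h3 h4 h5 h6 <;>
      injection hs with ha hb <;> subst ha <;> subst hb <;>
      simp_all [Prod.mk.injEq] <;> omega

theorem dist_eq (x y : Int) :
    manhattanOnHex x y = max (max |x| |y|) |x + y| := by
  unfold manhattanOnHex signA
  rcases abs_cases x with ⟨e1, h1⟩ | ⟨e1, h1⟩ <;>
    rcases abs_cases y with ⟨e2, h2⟩ | ⟨e2, h2⟩ <;>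
      rcases abs_cases (x + y) with ⟨e3, h3⟩ | ⟨e3, h3⟩ <;>
        rw [e1, e2, e3] <;> simp only [max_def] <;> split_ifs <;> first | omega | simp_all

-- ===== VERDICT =====
theorem partOne_spec : Claim_equal_partOne := by
  intro i _
  unfold Spec_partOne partOne partOne_alt
  simp only [PySem.List.count_eq]
  rw [fold_counts]
  simp only [zero_add]
  exact dist_eq _ _
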